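-- pv_equiv track=rewrite | github.com/HKUDS/nanobot | nanobot/agent/tools/smriti/store.py | _infer_kind
-- ===== SOURCE A (Python) =====
-- def _infer_kind(kind: str | None, text: str) -> str:
--     k = (kind or "").strip().lower()
--     if k in ("fact", "pref", "decision", "todo", "note"):
--         return k
--     t = (text or "").lstrip().lower()
--     for prefix, kk in (
--         ("fact:", "fact"),
--         ("pref:", "pref"),
--         ("decision:", "decision"),
--         ("todo:", "todo"),
--         ("note:", "note"),
--     ):
--         if t.startswith(prefix):
--             return kk
--     return "note"
-- ===== SOURCE B (Python) =====
-- _VALID = {"fact", "pref", "decision", "todo", "note"}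
--
--
-- def _infer_kind(kind: str | None, text: str) -> str:
--     k = (kind or "").strip().lower()
--     if k in _VALID:
--         return k
--     t = (text or "").lstrip().lower()
--     head, sep, _ = t.partition(":")
--     return head if sep and head in _VALID else "note"
-- ===== Notes on version B (the rewrite author's own statement) =====
-- stated objective: simpler
-- what changed: The five-literal prefix loop over the text is replaced by a single partition at the first colon followed by one set-membership test of the extracted label.
import Mathlib
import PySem

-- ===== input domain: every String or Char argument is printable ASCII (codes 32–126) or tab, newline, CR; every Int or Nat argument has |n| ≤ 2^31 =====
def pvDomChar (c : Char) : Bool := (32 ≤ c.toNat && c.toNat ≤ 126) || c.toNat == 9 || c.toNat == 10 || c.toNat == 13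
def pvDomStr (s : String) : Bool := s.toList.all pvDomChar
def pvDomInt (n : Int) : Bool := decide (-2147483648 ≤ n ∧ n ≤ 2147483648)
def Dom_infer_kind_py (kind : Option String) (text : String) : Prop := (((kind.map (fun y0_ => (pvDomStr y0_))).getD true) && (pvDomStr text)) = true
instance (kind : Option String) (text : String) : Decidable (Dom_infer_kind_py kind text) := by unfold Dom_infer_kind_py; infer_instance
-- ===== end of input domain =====

-- B replaces A's five-literal prefix loop by one partition at the first colon plus a single label-set lookup (simpler).

-- ===== PORT A =====
def inferLoopA (t : String) : List (String × String) → String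
  | [] => "note"
  | (p, kk) :: rest => if PySem.Str.startswith t p then kk else inferLoopA t rest

def infer_kind_py (kind : Option String) (text : String) : String :=
  let k := PySem.Str.lower (PySem.Str.strip (kind.getD ""))
  if k == "fact" || k == "pref" || k == "decision" || k == "todo" || k == "note" then k
  else
    inferLoopA (PySem.Str.lower (PySem.Str.lstrip text))
      [("fact:", "fact"), ("pref:", "pref"), ("decision:", "decision"),
       ("todo:", "todo"), ("note:", "note")]

-- ===== PORT B =====
-- hand port of Python's t.partition(":") (no PySem primitive): exact — returns the
-- characters before the first ':' and whether a ':' occurs at all (= sep nonempty).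
def partColon : List Char → List Char × Bool
  | [] => ([], false)
  | c :: rest =>
      if c = ':' then ([], true)
      else
        let r := partColon rest
        (c :: r.1, r.2)

def infer_kind_py_alt (kind : Option String) (text : String) : String :=
  let k := PySem.Str.lower (PySem.Str.strip (kind.getD ""))
  if k == "fact" || k == "pref" || k == "decision" || k == "todo" || k == "note" then k
  else
    let t := PySem.Str.lower (PySem.Str.lstrip text)
    let pr := partColon t.toList
    if pr.2 && (pr.1 == "fact".toList || pr.1 == "pref".toList || pr.1 == "decision".toList
                || pr.1 == "todo".toList || pr.1 == "note".toList)
    then String.ofList pr.1 else "note"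

-- ===== PRECONDITION & SPEC =====
def Spec_infer_kind_py (kind : Option String) (text : String) (out : String) : Prop := out = infer_kind_py_alt kind text
instance (kind : Option String) (text : String) (out : String) : Decidable (Spec_infer_kind_py kind text out) := by unfold Spec_infer_kind_py; infer_instance

-- ===== CLAIM (what is proved, stated in full; the proofs are below) =====
def Claim_equal_infer_kind_py : Prop := ∀ (kind : Option String) (text : String), Dom_infer_kind_py kind text → Spec_infer_kind_py kind text (infer_kind_py kind text)

-- ===== LEMMAS AND PROOFS =====

theorem partColon_append (p r : List Char) (hp : ':' ∉ p) :
    partColon (p ++ ':' :: r) = (p, true) := by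
  induction p with
  | nil => simp [partColon]
  | cons c cs ih =>
      simp only [List.mem_cons, not_or] at hp
      have hc : ¬ c = ':' := fun h => hp.1 h.symm
      simp [partColon, hc, ih hp.2]

theorem partColon_true (tl p : List Char) (h : partColon tl = (p, true)) :
    ∃ r, tl = p ++ ':' :: r := by
  induction tl generalizing p with
  | nil => simp [partColon] at h
  | cons c cs ih =>
      by_cases hc : c = ':'
      · simp [partColon, hc] at h
        exact ⟨cs, by simp [← h, hc]⟩
      · rcases hcs : partColon cs with ⟨q, b⟩
        simp [partColon, hc, hcs] at h
        obtain ⟨h1', h2'⟩ := h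
        obtain ⟨r, hr⟩ := ih q (by rw [hcs, h2'])
        exact ⟨r, by simp [← h1', hr]⟩

theorem partColon_mem (tl : List Char) (h : ':' ∈ tl) : (partColon tl).2 = true := by
  induction tl with
  | nil => simp at h
  | cons c cs ih =>
      by_cases hc : c = ':'
      · simp [partColon, hc]
      · have h' : ':' ∈ cs := by
          rcases List.mem_cons.mp h with h'' | h''
          · exact absurd h''.symm hc
          · exact h''
        simp [partColon, hc, ih h']

theorem startswith_iff_partColon (tl p : List Char) (hp : ':' ∉ p) :
    PySem.Chars.startswith tl (p ++ [':']) = true ↔ partColon tl = (p, true) := by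
  rw [PySem.Chars.startswith_iff]
  constructor
  · rintro ⟨r, hr⟩
    have : tl = p ++ ':' :: r := by simpa using hr.symm
    rw [this]; exact partColon_append p r hp
  · intro h
    obtain ⟨r, hr⟩ := partColon_true tl p h
    exact ⟨r, by simp [hr]⟩

theorem sw_true (tl p h : List Char) (hp : ':' ∉ p) (hPC : partColon tl = (h, true))
    (he : h = p) : PySem.Chars.startswith tl (p ++ [':']) = true :=
  (startswith_iff_partColon tl p hp).mpr (by rw [hPC, he])

theorem sw_false (tl p h : List Char) (hp : ':' ∉ p) (hPC : partColon tl = (h, true))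
    (hne : ¬ h = p) : PySem.Chars.startswith tl (p ++ [':']) = false := by
  cases hh : PySem.Chars.startswith tl (p ++ [':']) with
  | false => rfl
  | true =>
      have h2 := (startswith_iff_partColon tl p hp).mp hh
      exact absurd (by simpa using hPC.symm.trans h2) hne

theorem loop_eq (t : String) :
    inferLoopA t
      [("fact:", "fact"), ("pref:", "pref"), ("decision:", "decision"),
       ("todo:", "todo"), ("note:", "note")]
    = (let pr := partColon t.toList
       if pr.2 && (pr.1 == "fact".toList || pr.1 == "pref".toList || pr.1 == "decision".toList
                   || pr.1 == "todo".toList || pr.1 == "note".toList)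
       then String.ofList pr.1 else "note") := by
  rcases hPC : partColon t.toList with ⟨h, f⟩
  cases f with
  | false =>
      have nosw : ∀ p : List Char, PySem.Chars.startswith t.toList (p ++ [':']) = false := by
        intro p
        cases hh : PySem.Chars.startswith t.toList (p ++ [':']) with
        | false => rfl
        | true =>
            rw [PySem.Chars.startswith_iff] at hh
            have hmem : ':' ∈ t.toList := hh.mem (by simp)
            have := partColon_mem t.toList hmem
            rw [hPC] at this
            simp at this
      have n1 : PySem.Chars.startswith t.toList ['f','a','c','t',':'] = false := nosw ['f','a','c','t']
      have n2 : PySem.Chars.startswith t.toList ['p','r','e','f',':'] = false := nosw ['p','r','e','f']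
      have n3 : PySem.Chars.startswith t.toList ['d','e','c','i','s','i','o','n',':'] = false := nosw ['d','e','c','i','s','i','o','n']
      have n4 : PySem.Chars.startswith t.toList ['t','o','d','o',':'] = false := nosw ['t','o','d','o']
      have n5 : PySem.Chars.startswith t.toList ['n','o','t','e',':'] = false := nosw ['n','o','t','e']
      simp [inferLoopA, n1, n2, n3, n4, n5]
  | true =>
      by_cases h1 : h = ['f','a','c','t']
      ·
        have s1 : PySem.Chars.startswith t.toList ['f','a','c','t',':'] = true := sw_true t.toList ['f','a','c','t'] h (by decide) hPC h1
        simp [inferLoopA, s1, h1]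
      by_cases h2 : h = ['p','r','e','f']
      ·
        have n1 : PySem.Chars.startswith t.toList ['f','a','c','t',':'] = false := sw_false t.toList ['f','a','c','t'] h (by decide) hPC h1
        have s2 : PySem.Chars.startswith t.toList ['p','r','e','f',':'] = true := sw_true t.toList ['p','r','e','f'] h (by decide) hPC h2
        simp [inferLoopA, n1, s2, h2]
      by_cases h3 : h = ['d','e','c','i','s','i','o','n']
      ·
        have n1 : PySem.Chars.startswith t.toList ['f','a','c','t',':'] = false := sw_false t.toList ['f','a','c','t'] h (by decide) hPC h1
        have n2 : PySem.Chars.startswith t.toList ['p','r','e','f',':'] = false := sw_false t.toList ['p','r','e','f'] h (by decide) hPC h2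
        have s3 : PySem.Chars.startswith t.toList ['d','e','c','i','s','i','o','n',':'] = true := sw_true t.toList ['d','e','c','i','s','i','o','n'] h (by decide) hPC h3
        simp [inferLoopA, n1, n2, s3, h3]
      by_cases h4 : h = ['t','o','d','o']
      ·
        have n1 : PySem.Chars.startswith t.toList ['f','a','c','t',':'] = false := sw_false t.toList ['f','a','c','t'] h (by decide) hPC h1
        have n2 : PySem.Chars.startswith t.toList ['p','r','e','f',':'] = false := sw_false t.toList ['p','r','e','f'] h (by decide) hPC h2
        have n3 : PySem.Chars.startswith t.toList ['d','e','c','i','s','i','o','n',':'] = false := sw_false t.toList ['d','e','c','i','s','i','o','n'] h (by decide) hPC h3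
        have s4 : PySem.Chars.startswith t.toList ['t','o','d','o',':'] = true := sw_true t.toList ['t','o','d','o'] h (by decide) hPC h4
        simp [inferLoopA, n1, n2, n3, s4, h4]
      by_cases h5 : h = ['n','o','t','e']
      ·
        have n1 : PySem.Chars.startswith t.toList ['f','a','c','t',':'] = false := sw_false t.toList ['f','a','c','t'] h (by decide) hPC h1
        have n2 : PySem.Chars.startswith t.toList ['p','r','e','f',':'] = false := sw_false t.toList ['p','r','e','f'] h (by decide) hPC h2
        have n3 : PySem.Chars.startswith t.toList ['d','e','c','i','s','i','o','n',':'] = false := sw_false t.toList ['d','e','c','i','s','i','o','n'] h (by decide) hPC h3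
        have n4 : PySem.Chars.startswith t.toList ['t','o','d','o',':'] = false := sw_false t.toList ['t','o','d','o'] h (by decide) hPC h4
        have s5 : PySem.Chars.startswith t.toList ['n','o','t','e',':'] = true := sw_true t.toList ['n','o','t','e'] h (by decide) hPC h5
        simp [inferLoopA, n1, n2, n3, n4, s5, h5]
      ·
        have n1 : PySem.Chars.startswith t.toList ['f','a','c','t',':'] = false := sw_false t.toList ['f','a','c','t'] h (by decide) hPC h1
        have n2 : PySem.Chars.startswith t.toList ['p','r','e','f',':'] = false := sw_false t.toList ['p','r','e','f'] h (by decide) hPC h2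
        have n3 : PySem.Chars.startswith t.toList ['d','e','c','i','s','i','o','n',':'] = false := sw_false t.toList ['d','e','c','i','s','i','o','n'] h (by decide) hPC h3
        have n4 : PySem.Chars.startswith t.toList ['t','o','d','o',':'] = false := sw_false t.toList ['t','o','d','o'] h (by decide) hPC h4
        have n5 : PySem.Chars.startswith t.toList ['n','o','t','e',':'] = false := sw_false t.toList ['n','o','t','e'] h (by decide) hPC h5
        simp [inferLoopA, n1, n2, n3, n4, n5, h1, h2, h3, h4, h5]

-- ===== VERDICT (by name: the statement is the Claim_ definition above) =====
theorem infer_kind_py_spec : Claim_equal_infer_kind_py := by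
  intro kind text _
  unfold Spec_infer_kind_py infer_kind_py infer_kind_py_alt
  dsimp only
  split
  · rfl
  · exact loop_eq (PySem.Str.lower (PySem.Str.lstrip text))
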